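-- pv_equiv track=rewrite | github.com/rishabhranawat/CrowdPlatform | create_lesson_plan/comprehension_burden_module/beam_search_comprehension_burden.py | group_urls
-- ===== SOURCE A (Python) =====
-- def group_urls(docs):
-- 	grouped = {}
-- 	for d in docs:
-- 		typ = d["content_type"]
-- 		if(typ in grouped):
-- 			grouped[typ].append(d["url"])
-- 		else:
-- 			grouped[typ] = [d["url"]]
-- 	return grouped
-- ===== SOURCE B (Python) =====
-- def group_urls(docs):
--     # Pass 1: record each content_type in first-appearance order; pass 2: per-type comprehension.
--     order = []
--     seen = set()
--     for d in docs:
--         t = d["content_type"]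
--         if t not in seen:
--             seen.add(t)
--             order.append(t)
--     return {t: [d["url"] for d in docs if d["content_type"] == t] for t in order}
-- ===== Notes on version B (the rewrite author's own statement) =====
-- stated objective: alternative
-- what changed: Replaces A's single-pass incremental dict insertion/append with a two-phase strategy: one pass collects the distinct content_types in first-appearance order, then a dict comprehension builds each group by filtering the whole list per type.
import Mathlib
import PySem

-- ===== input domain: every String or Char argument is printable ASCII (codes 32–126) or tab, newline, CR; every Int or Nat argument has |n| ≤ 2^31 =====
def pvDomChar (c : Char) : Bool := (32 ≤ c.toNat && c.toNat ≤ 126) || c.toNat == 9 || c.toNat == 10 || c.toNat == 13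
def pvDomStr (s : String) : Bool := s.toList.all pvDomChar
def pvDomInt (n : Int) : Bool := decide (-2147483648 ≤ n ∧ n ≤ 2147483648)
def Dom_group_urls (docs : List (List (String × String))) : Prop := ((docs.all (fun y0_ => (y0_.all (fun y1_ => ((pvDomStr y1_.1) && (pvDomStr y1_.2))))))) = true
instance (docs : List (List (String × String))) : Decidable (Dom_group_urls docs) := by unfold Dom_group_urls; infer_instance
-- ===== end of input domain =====

-- B groups URLs in two phases (collect distinct content_types in first-appearance order,
-- then one filter per type) instead of A's single-pass incremental dict insertion; same cost class, alternative algorithm.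


-- d["content_type"] / d["url"] on an assoc-list dict: first match; none = KeyError (excluded by Pre_)
def pvTyp (d : List (String × String)) : Option String := (PySem.Dict.mk d).get? "content_type"
def pvUrl (d : List (String × String)) : Option String := (PySem.Dict.mk d).get? "url"

-- ===== PORT A =====
def group_urls (docs : List (List (String × String))) : List (String × List String) :=
  (docs.foldl (fun g d =>
      match pvTyp d with
      | none => g          -- KeyError: unreachable under Pre_
      | some t =>
        if g.contains t then
          match pvUrl d with
          | none => g      -- KeyError: unreachable under Pre_
          | some u => g.modify t [] (· ++ [u])   -- grouped[typ].append(d["url"])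
        else
          match pvUrl d with
          | none => g      -- KeyError: unreachable under Pre_
          | some u => g.insert t [u])            -- grouped[typ] = [d["url"]]
    PySem.Dict.empty).items

-- ===== PORT B =====
def group_urls_alt (docs : List (List (String × String))) : List (String × List String) :=
  -- pass 1: distinct content_types in first-appearance order (seen-set + order-list of Source B, one Set)
  let order : PySem.Set String :=
    docs.foldl (fun s d =>
      match pvTyp d with
      | none => s          -- KeyError: unreachable under Pre_
      | some t => PySem.Set.add s t) PySem.Set.empty
  -- pass 2: per-type comprehension [d["url"] for d in docs if d["content_type"] == t]
  order.map (fun t => (t, (docs.filter (fun d => pvTyp d == some t)).filterMap pvUrl))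

-- ===== PRECONDITION & SPEC =====
-- Pre_ excludes exactly the docs missing a "content_type" or "url" key, on which Python A raises KeyError.
def Pre_group_urls (docs : List (List (String × String))) : Prop :=
  ∀ d ∈ docs, (pvTyp d).isSome ∧ (pvUrl d).isSome
instance (docs : List (List (String × String))) : Decidable (Pre_group_urls docs) := by
  unfold Pre_group_urls; infer_instance
def pvWitness_group_urls : (List (List (String × String))) :=
  [[("content_type", "text"), ("url", "a.com")], [("content_type", "img"), ("url", "b.com")],
   [("content_type", "text"), ("url", "c.com")]]

def Spec_group_urls (docs : List (List (String × String))) (out : List (String × List String)) : Prop := out = group_urls_alt docs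
instance (docs : List (List (String × String))) (out : List (String × List String)) : Decidable (Spec_group_urls docs out) := by unfold Spec_group_urls; infer_instance

-- ===== CLAIM (what is proved, stated in full; the proofs are below) =====
def Claim_equal_group_urls : Prop := ∀ (docs : List (List (String × String))), Dom_group_urls docs → Pre_group_urls docs → Spec_group_urls docs (group_urls docs)

-- ===== LEMMAS AND PROOFS =====

-- total key/url readers, valid under Pre_
def pvTypD (d : List (String × String)) : String := (pvTyp d).getD ""
def pvUrlD (d : List (String × String)) : String := (pvUrl d).getD ""

theorem pv_insert_eq_modify (g : PySem.Dict String (List String)) (t u : String)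
    (h : g.contains t = false) : g.insert t [u] = g.modify t [] (· ++ [u]) := by
  simp [PySem.Dict.insert, PySem.Dict.modify, h, PySem.Dict.getD_of_not_contains g [] h]

-- A's loop body is, under Pre_, a modify keyed by pvTypD
theorem pv_stepA (g : PySem.Dict String (List String)) (d : List (String × String))
    (ht : (pvTyp d).isSome) (hu : (pvUrl d).isSome) :
    (match pvTyp d with
     | none => g
     | some t =>
       if g.contains t then
         match pvUrl d with
         | none => g
         | some u => g.modify t [] (· ++ [u])
       else
         match pvUrl d with
         | none => g
         | some u => g.insert t [u])
    = g.modify (pvTypD d) [] (· ++ [pvUrlD d]) := by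
  obtain ⟨t, het⟩ := Option.isSome_iff_exists.mp ht
  obtain ⟨u, heu⟩ := Option.isSome_iff_exists.mp hu
  simp only [pvTypD, pvUrlD, het, heu, Option.getD_some]
  by_cases hc : g.contains t = true
  · simp only [hc, if_true]
  · simp only [hc, if_false, Bool.false_eq_true]
    exact pv_insert_eq_modify g t u (by simpa using hc)

-- B's URL comprehension for one type t, rewritten over the (type, url) pairs
theorem pv_urls_eq (docs : List (List (String × String)))
    (h : ∀ d ∈ docs, (pvTyp d).isSome ∧ (pvUrl d).isSome) (t : String) :
    (docs.filter (fun d => pvTyp d == some t)).filterMap pvUrl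
      = ((docs.map (fun d => (pvTypD d, pvUrlD d))).filter (fun p => p.1 == t)).map (·.2) := by
  induction docs with
  | nil => simp
  | cons d ds ih =>
    obtain ⟨ht, hu⟩ := h d (List.mem_cons_self)
    obtain ⟨a, het⟩ := Option.isSome_iff_exists.mp ht
    obtain ⟨u, heu⟩ := Option.isSome_iff_exists.mp hu
    have ih' := ih (fun x hx => h x (List.mem_cons_of_mem _ hx))
    by_cases hat : (a == t) = true
    · simp [het, heu, pvTypD, pvUrlD, hat, ih']
    · simp [het, heu, pvTypD, pvUrlD, hat, ih']

theorem pv_main (docs : List (List (String × String))) (h : Pre_group_urls docs) :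
    group_urls docs = group_urls_alt docs := by
  have hA : (docs.foldl (fun g d =>
      match pvTyp d with
      | none => g
      | some t =>
        if g.contains t then
          match pvUrl d with
          | none => g
          | some u => g.modify t [] (· ++ [u])
        else
          match pvUrl d with
          | none => g
          | some u => g.insert t [u]) PySem.Dict.empty)
      = (docs.map (fun d => (pvTypD d, pvUrlD d))).foldl
          (fun g p => g.modify p.1 [] (· ++ [p.2])) PySem.Dict.empty := by
    rw [List.foldl_map]
    exact PySem.List.foldl_congr_mem docs _ _ _
      (fun g d hd => pv_stepA g d (h d hd).1 (h d hd).2)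
  have hB : (docs.foldl (fun s d =>
      match pvTyp d with
      | none => s
      | some t => PySem.Set.add s t) PySem.Set.empty)
      = PySem.Set.ofList (docs.map pvTypD) := by
    have : (docs.foldl (fun s d =>
        match pvTyp d with
        | none => s
        | some t => PySem.Set.add s t) PySem.Set.empty)
        = docs.foldl (fun s d => PySem.Set.add s (pvTypD d)) PySem.Set.empty := by
      refine PySem.List.foldl_congr_mem docs _ _ _ (fun s d hd => ?_)
      obtain ⟨a, het⟩ := Option.isSome_iff_exists.mp (h d hd).1
      simp [het, pvTypD]
    rw [this, ← PySem.Set.update_map_eq_foldl_add]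
    exact PySem.Set.update_nil_left _
  set pairs := docs.map (fun d => (pvTypD d, pvUrlD d)) with hpairs
  have hkeysfst : pairs.map Prod.fst = docs.map pvTypD := by
    simp [hpairs, List.map_map]
  have hnd : ((pairs.foldl (fun g p => g.modify p.1 [] (· ++ [p.2]))
      PySem.Dict.empty : PySem.Dict String (List String)).keys).Nodup := by
    exact PySem.Dict.nodup_keys_foldl_modify_key pairs Prod.fst [] (fun g p v => v ++ [p.2]) _
      (by simp [PySem.Dict.keys_empty])
  have hkeys : (pairs.foldl (fun g p => g.modify p.1 [] (· ++ [p.2]))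
      (PySem.Dict.empty : PySem.Dict String (List String))).keys
      = PySem.Set.ofList (docs.map pvTypD) := by
    rw [PySem.Dict.keys_foldl_modify_key pairs Prod.fst [] (fun g p v => v ++ [p.2])]
    simp [PySem.Dict.keys_empty, PySem.Set.update_nil_left, hkeysfst]
  unfold group_urls group_urls_alt
  rw [hA, hB, PySem.Dict.items_eq_map_keys _ hnd [], hkeys]
  refine List.map_congr_left (fun t _ => ?_)
  rw [PySem.Dict.getD_foldl_modify_append pairs PySem.Dict.empty t,
    PySem.Dict.getD_empty, pv_urls_eq docs h t, ← hpairs, List.nil_append]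

-- ===== VERDICT (by name: the statement is the Claim_ definition above) =====
theorem group_urls_spec : Claim_equal_group_urls := by
  intro docs _ hpre
  unfold Spec_group_urls
  exact pv_main docs hpre
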